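-- pv_equiv track=rewrite | github.com/krissnnaa/Software-Supply-chain-Risk-Analysis- | main.py | countDependeincies
-- ===== SOURCE A (Python) =====
-- def countDependeincies(dB):
--     """
--     Counts number of dependecies of each package
--     """
--     count=[]
--     numberDep={}
--     numDep={}
--     for i in range(len(dB)):
--         count.append(0)
--     i=0
--     for key,value in dB.items():
--         depList=[]
--         for k,val in dB.items():
--             if k==key:
--                 continue
--             else:
--                 for v in val:
--                     if v==key:
--                         count[i]=count[i]+1
--                         depList.append(k)
--         numberDep[key]= count[i]
--         numDep[key]=depList
--         i=i+1
--     return numberDep,numDep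
-- ===== SOURCE B (Python) =====
-- def countDependeincies(dB):
--     """
--     Counts number of dependecies of each package
--     """
--     numDep = {key: [] for key in dB}
--     for k, val in dB.items():
--         for v in val:
--             if v != k and v in numDep:
--                 numDep[v].append(k)
--     numberDep = {key: len(deps) for key, deps in numDep.items()}
--     return numberDep, numDep
-- ===== Notes on version B (the rewrite author's own statement) =====
-- stated objective: faster
-- what changed: A scans the whole dict again for every key (nested loops over all pairs); B makes one pass over the edges, appending each dependent into a prebuilt reverse-dependency map, and derives the counts as the lengths of those lists.
import Mathlib
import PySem

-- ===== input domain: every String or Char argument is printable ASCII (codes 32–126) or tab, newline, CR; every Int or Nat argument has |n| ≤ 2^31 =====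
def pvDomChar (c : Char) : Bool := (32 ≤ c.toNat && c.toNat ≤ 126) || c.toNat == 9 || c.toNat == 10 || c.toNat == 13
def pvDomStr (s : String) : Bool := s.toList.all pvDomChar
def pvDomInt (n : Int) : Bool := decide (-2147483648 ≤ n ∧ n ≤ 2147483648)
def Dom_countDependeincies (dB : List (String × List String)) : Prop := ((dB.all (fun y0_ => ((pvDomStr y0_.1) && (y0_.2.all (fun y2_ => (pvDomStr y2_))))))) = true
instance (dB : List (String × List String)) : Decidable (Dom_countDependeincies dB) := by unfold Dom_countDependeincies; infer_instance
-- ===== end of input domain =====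

-- B replaces A's quadratic rescan of the whole dict per key by one pass over the
-- dependency lists into a prebuilt reverse-dependency map (objective: faster, asymptotic).

-- ===== PORT A =====
-- innermost loop body: 'for v in val: if v==key: count[i]+=1; depList.append(k)'
def pvStepValA (key k : String) (i : Nat) (p : List Int × List String) (v : String) : List Int × List String :=
  if v == key then (p.1.set i (p.1.getD i 0 + 1), p.2 ++ [k]) else p

-- the middle loop 'for k,val in dB.items(): if k==key: continue else: …' starting from (count, [])
def pvInnerA (dB : List (String × List String)) (key : String) (i : Nat) (c : List Int) :
    List Int × List String :=
  dB.foldl (fun p kv2 => if kv2.1 == key then p else kv2.2.foldl (pvStepValA key kv2.1 i) p) (c, [])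

-- the outer loop over 'for key,value in dB.items()', state = (count, numberDep, numDep, i)
def pvOuterA (dB l : List (String × List String))
    (st : List Int × PySem.Dict String Int × PySem.Dict String (List String) × Nat) :
    List Int × PySem.Dict String Int × PySem.Dict String (List String) × Nat :=
  l.foldl (fun st kv =>
    let inner := pvInnerA dB kv.1 st.2.2.2 st.1
    (inner.1, st.2.1.insert kv.1 (inner.1.getD st.2.2.2 0), st.2.2.1.insert kv.1 inner.2,
     st.2.2.2 + 1)) st

def countDependeincies (dB : List (String × List String)) :
    (List (String × Int)) × (List (String × List String)) :=
  let count : List Int :=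
    (PySem.List.pyRange 0 (dB.length : Int) 1).foldl (fun c _ => c ++ [(0 : Int)]) []
  let st := pvOuterA dB dB (count, PySem.Dict.empty, PySem.Dict.empty, 0)
  (st.2.1.items, st.2.2.1.items)

-- ===== PORT B =====
-- 'for v in val: if v != k and v in numDep: numDep[v].append(k)'
def pvStepB (k : String) (d : PySem.Dict String (List String)) (v : String) :
    PySem.Dict String (List String) :=
  if v != k && d.contains v then d.modify v [] (fun l => l ++ [k]) else d

def countDependeincies_alt (dB : List (String × List String)) :
    (List (String × Int)) × (List (String × List String)) :=
  let numDep0 : PySem.Dict String (List String) :=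
    dB.foldl (fun d kv => d.insert kv.1 []) PySem.Dict.empty
  let numDep := dB.foldl (fun d kv => kv.2.foldl (pvStepB kv.1) d) numDep0
  (numDep.items.map (fun kv => (kv.1, (kv.2.length : Int))), numDep.items)

-- ===== PRECONDITION & SPEC =====
-- Pre_ excludes association lists with duplicate keys: they do not represent any Python
-- dict (a dict literal collapses duplicates before A ever runs), so no behaviour of A is
-- defined for them.
def Pre_countDependeincies (dB : List (String × List String)) : Prop :=
  (dB.map Prod.fst).Nodup

instance (dB : List (String × List String)) : Decidable (Pre_countDependeincies dB) := by
  unfold Pre_countDependeincies; infer_instance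

def pvWitness_countDependeincies : (List (String × List String)) :=
  [("a", ["b"]), ("b", ["a", "c"])]

def Spec_countDependeincies (dB : List (String × List String))
    (out : (List (String × Int)) × (List (String × List String))) : Prop :=
  out = countDependeincies_alt dB

instance (dB : List (String × List String))
    (out : (List (String × Int)) × (List (String × List String))) :
    Decidable (Spec_countDependeincies dB out) := by unfold Spec_countDependeincies; infer_instance

-- ===== CLAIM (what is proved, stated in full; the proofs are below) =====
def Claim_equal_countDependeincies : Prop :=
  ∀ (dB : List (String × List String)), Dom_countDependeincies dB →
    Pre_countDependeincies dB → Spec_countDependeincies dB (countDependeincies dB)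

-- ===== LEMMAS AND PROOFS =====

-- reverse-dependency list of `key` contributed by the entries of `l` (the common spec)
def pvDep (key : String) (l : List (String × List String)) : List String :=
  l.flatMap (fun kv =>
    if kv.1 == key then []
    else (kv.2.filter (fun v => v == key)).map (fun _ => kv.1))

theorem pvDep_cons (key : String) (kv : String × List String) (l : List (String × List String)) :
    pvDep key (kv :: l) =
      (if kv.1 == key then []
       else (kv.2.filter (fun v => v == key)).map (fun _ => kv.1)) ++ pvDep key l := by
  simp [pvDep]

theorem pv_set_getD_self (c : List Int) (i : Nat) (h : i < c.length) :
    c.set i (c.getD i 0) = c := by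
  apply List.ext_getElem <;> simp
  intro j h1 h2
  rw [List.getElem_set]
  split
  · subst j; simp [List.getElem?_eq_getElem h]
  · rfl

theorem pv_getD_set_self (c : List Int) (i : Nat) (x : Int) (h : i < c.length) :
    (c.set i x).getD i 0 = x := by
  simp [List.getD_eq_getElem?_getD, h]

theorem pv_getD_set_ne (c : List Int) (i j : Nat) (x : Int) (h : i ≠ j) :
    (c.set i x).getD j 0 = c.getD j 0 := by
  simp [List.getD_eq_getElem?_getD, h]

theorem pvValFoldA (val : List String) (key k : String) (i : Nat) (c : List Int)
    (dep : List String) (h : i < c.length) :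
    val.foldl (pvStepValA key k i) (c, dep) =
      (c.set i (c.getD i 0 + ((val.filter (fun v => v == key)).length : Int)),
       dep ++ (val.filter (fun v => v == key)).map (fun _ => k)) := by
  induction val generalizing c dep with
  | nil =>
    simp only [List.foldl_nil, List.filter_nil, List.length_nil, List.map_nil, List.append_nil]
    rw [show ((0:Nat):Int) = 0 from rfl, Int.add_zero, pv_set_getD_self c i h]
  | cons v tl ih =>
    simp only [List.foldl_cons, pvStepValA]
    by_cases hv : (v == key) = true
    · rw [if_pos hv]
      rw [ih _ _ (by simpa using h)]
      rw [List.filter_cons_of_pos (l := tl) (p := fun v => v == key) hv]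
      simp only [List.set_set, List.length_cons, List.map_cons]
      rw [pv_getD_set_self c i _ h]
      refine Prod.ext ?_ ?_
      · simp only []
        congr 1
        push_cast; ring
      · simp
    · rw [if_neg hv, ih _ _ h,
        List.filter_cons_of_neg (l := tl) (p := fun v => v == key) (by simpa using hv)]

theorem pvInnerFoldA (l : List (String × List String)) (key : String) (i : Nat) (c : List Int)
    (dep : List String) (h : i < c.length) :
    l.foldl (fun p kv2 => if kv2.1 == key then p else kv2.2.foldl (pvStepValA key kv2.1 i) p)
        (c, dep) =
      (c.set i (c.getD i 0 + ((pvDep key l).length : Int)), dep ++ pvDep key l) := by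
  induction l generalizing c dep with
  | nil =>
    simp only [List.foldl_nil, pvDep, List.flatMap_nil, List.length_nil, List.append_nil]
    rw [show ((0:Nat):Int) = 0 from rfl, Int.add_zero, pv_set_getD_self c i h]
  | cons kv tl ih =>
    simp only [List.foldl_cons]
    rw [pvDep_cons]
    by_cases hk : (kv.1 == key) = true
    · rw [if_pos hk, if_pos hk, ih _ _ h]
      simp
    · rw [if_neg hk, if_neg hk]
      rw [pvValFoldA _ _ _ _ _ _ h]
      rw [ih _ _ (by simpa using h)]
      rw [pv_getD_set_self c i _ h, List.set_set]
      refine Prod.ext ?_ ?_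
      · simp only []
        congr 1
        simp only [List.length_append, List.length_map]
        push_cast; ring
      · simp

theorem pvOuterFoldA (dB : List (String × List String)) (r : List (String × List String))
    (c : List Int) (nb : PySem.Dict String Int) (nd : PySem.Dict String (List String)) (i : Nat)
    (hlen : i + r.length ≤ c.length)
    (hz : ∀ j, i ≤ j → c.getD j 0 = 0)
    (hnb : ∀ kv ∈ r, nb.contains kv.1 = false)
    (hnd : ∀ kv ∈ r, nd.contains kv.1 = false)
    (hnod : (r.map Prod.fst).Nodup) :
    (pvOuterA dB r (c, nb, nd, i)).2.1.items =
        nb.items ++ r.map (fun kv => (kv.1, ((pvDep kv.1 dB).length : Int))) ∧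
      (pvOuterA dB r (c, nb, nd, i)).2.2.1.items =
        nd.items ++ r.map (fun kv => (kv.1, pvDep kv.1 dB)) := by
  induction r generalizing c nb nd i with
  | nil => simp [pvOuterA]
  | cons kv tl ih =>
    have hic : i < c.length := by simp only [List.length_cons] at hlen; omega
    have hinner : pvInnerA dB kv.1 i c =
        (c.set i ((pvDep kv.1 dB).length : Int), pvDep kv.1 dB) := by
      unfold pvInnerA
      rw [pvInnerFoldA dB kv.1 i c [] hic, hz i le_rfl]
      simp
    have hgd : (c.set i ((pvDep kv.1 dB).length : Int)).getD i 0
        = ((pvDep kv.1 dB).length : Int) := pv_getD_set_self c i _ hic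
    have hne : ∀ kv2 ∈ tl, kv2.1 ≠ kv.1 := by
      intro kv2 hmem heq
      simp only [List.map_cons, List.nodup_cons] at hnod
      exact hnod.1 (heq ▸ List.mem_map_of_mem hmem)
    have hstep : pvOuterA dB (kv :: tl) (c, nb, nd, i)
        = pvOuterA dB tl (c.set i ((pvDep kv.1 dB).length : Int),
            nb.insert kv.1 ((pvDep kv.1 dB).length : Int),
            nd.insert kv.1 (pvDep kv.1 dB), i + 1) := by
      simp only [pvOuterA, List.foldl_cons, hinner, hgd]
    rw [hstep]
    have hres := ih (c.set i ((pvDep kv.1 dB).length : Int))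
      (nb.insert kv.1 ((pvDep kv.1 dB).length : Int))
      (nd.insert kv.1 (pvDep kv.1 dB)) (i + 1)
      (by simp only [List.length_set]; simp only [List.length_cons] at hlen; omega)
      (by
        intro j hj
        rw [pv_getD_set_ne c i j _ (by omega)]
        exact hz j (by omega))
      (by
        intro kv2 hmem
        rw [PySem.Dict.contains_insert]
        simp only [Bool.or_eq_false_iff]
        exact ⟨by simpa using hne kv2 hmem, hnb kv2 (List.mem_cons_of_mem _ hmem)⟩)
      (by
        intro kv2 hmem
        rw [PySem.Dict.contains_insert]
        simp only [Bool.or_eq_false_iff]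
        exact ⟨by simpa using hne kv2 hmem, hnd kv2 (List.mem_cons_of_mem _ hmem)⟩)
      (by simp only [List.map_cons, List.nodup_cons] at hnod; exact hnod.2)
    rw [hres.1, hres.2,
      PySem.Dict.items_insert_of_not_contains nb _ (hnb kv (List.mem_cons_self)),
      PySem.Dict.items_insert_of_not_contains nd _ (hnd kv (List.mem_cons_self))]
    simp

theorem pvCount0 (l : List Int) (c : List Int) :
    l.foldl (fun c _ => c ++ [(0 : Int)]) c = c ++ List.replicate l.length 0 := by
  induction l generalizing c with
  | nil => simp
  | cons x tl ih =>
    rw [List.foldl_cons, ih]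
    simp [List.replicate_succ, List.append_assoc]

theorem pvA_items (dB : List (String × List String)) (hpre : (dB.map Prod.fst).Nodup) :
    countDependeincies dB =
      (dB.map (fun kv => (kv.1, ((pvDep kv.1 dB).length : Int))),
       dB.map (fun kv => (kv.1, pvDep kv.1 dB))) := by
  have hcount : (PySem.List.pyRange 0 (dB.length : Int) 1).foldl
      (fun c _ => c ++ [(0 : Int)]) [] = List.replicate dB.length (0 : Int) := by
    rw [pvCount0]
    simp [PySem.List.length_pyRange_one]
  have h := pvOuterFoldA dB dB (List.replicate dB.length (0 : Int))
    PySem.Dict.empty PySem.Dict.empty 0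
    (by simp)
    (by
      intro j _
      simp [List.getD_eq_getElem?_getD, List.getElem?_replicate]
      split <;> simp)
    (by intro kv _; exact PySem.Dict.contains_empty _)
    (by intro kv _; exact PySem.Dict.contains_empty _)
    hpre
  simp only [countDependeincies, hcount]
  rw [h.1, h.2]
  simp [PySem.Dict.empty]

theorem pvB_items_modify (d : PySem.Dict String (List String)) (v k : String)
    (hc : d.contains v = true) (hnod : d.keys.Nodup) :
    (d.modify v [] (fun l => l ++ [k])).items =
      d.items.map (fun p => if p.1 == v then (p.1, p.2 ++ [k]) else p) := by
  simp only [PySem.Dict.modify]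
  rw [PySem.Dict.items_insert_of_contains d _ hc]
  apply List.map_congr_left
  intro p hp
  obtain ⟨p1, p2⟩ := p
  by_cases h : (p1 == v) = true
  · simp only [if_pos h]
    have hpv : p1 = v := eq_of_beq h
    subst hpv
    rw [PySem.Dict.getD_of_mem_items d hp hnod []]
  · simp only [if_neg h]

theorem pvValFoldB (val : List String) (k : String) (d : PySem.Dict String (List String))
    (hnod : d.keys.Nodup) :
    (val.foldl (pvStepB k) d).items =
      d.items.map (fun p =>
        (p.1, p.2 ++ if k == p.1 then []
                     else (val.filter (fun v => v == p.1)).map (fun _ => k))) := by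
  induction val generalizing d with
  | nil =>
    simp
  | cons v tl ih =>
    simp only [List.foldl_cons, pvStepB]
    by_cases hvk : (v == k) = true
    · rw [if_neg (by simp [bne, hvk])]
      rw [ih d hnod]
      apply List.map_congr_left
      intro p _
      by_cases hkp : (k == p.1) = true
      · simp only [if_pos hkp]
      · simp only [if_neg hkp]
        have hv : ¬ ((v == p.1) = true) := by
          rw [eq_of_beq hvk]
          exact hkp
        rw [List.filter_cons_of_neg (l := tl) (p := fun v => v == p.1) hv]
    · have hvk' : v ≠ k := by simpa using hvk
      by_cases hcv : d.contains v = true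
      · rw [if_pos (by simp [bne, hvk', hcv])]
        have hitems := pvB_items_modify d v k hcv hnod
        have hkeys : (d.modify v [] (fun l => l ++ [k])).keys = d.keys := by
          simp only [PySem.Dict.keys, hitems, List.map_map]
          apply List.map_congr_left
          intro p _
          simp only [Function.comp]
          split <;> rfl
        rw [ih _ (hkeys ▸ hnod), hitems, List.map_map]
        apply List.map_congr_left
        intro p _
        simp only [Function.comp]
        by_cases hpv : (p.1 == v) = true
        · rw [if_pos hpv]
          have hp1 : p.1 = v := eq_of_beq hpv
          have hkp : ¬ ((k == p.1) = true) := by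
            simp only [beq_iff_eq]
            intro h
            exact hvk' (h.trans hp1).symm
          simp only [if_neg hkp]
          rw [List.filter_cons_of_pos (l := tl) (p := fun v => v == p.1) (by simp [hp1])]
          simp [List.append_assoc]
        · rw [if_neg hpv]
          by_cases hkp : (k == p.1) = true
          · simp only [if_pos hkp]
          · simp only [if_neg hkp]
            have hv : ¬ ((v == p.1) = true) := by
              simp only [beq_iff_eq] at hpv ⊢
              exact fun h => hpv h.symm
            rw [List.filter_cons_of_neg (l := tl) (p := fun v => v == p.1) hv]
      · rw [if_neg (by simp [hcv])]
        rw [ih d hnod]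
        apply List.map_congr_left
        intro p hp
        by_cases hkp : (k == p.1) = true
        · simp only [if_pos hkp]
        · simp only [if_neg hkp]
          have hpnev : ¬ ((v == p.1) = true) := by
            simp only [beq_iff_eq]
            intro h
            have : d.contains v = true := by
              simp only [PySem.Dict.contains, List.any_eq_true]
              exact ⟨p, hp, by simp [h.symm]⟩
            exact hcv this
          rw [List.filter_cons_of_neg (l := tl) (p := fun v => v == p.1) hpnev]

theorem pvOuterFoldB (r : List (String × List String)) (d : PySem.Dict String (List String))
    (hnod : d.keys.Nodup) :
    (r.foldl (fun d kv => kv.2.foldl (pvStepB kv.1) d) d).items =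
      d.items.map (fun p => (p.1, p.2 ++ pvDep p.1 r)) := by
  induction r generalizing d with
  | nil => simp [pvDep]
  | cons kv tl ih =>
    simp only [List.foldl_cons]
    have h1 := pvValFoldB kv.2 kv.1 d hnod
    have hkeys : (kv.2.foldl (pvStepB kv.1) d).keys = d.keys := by
      simp only [PySem.Dict.keys, h1, List.map_map]
      apply List.map_congr_left
      intro p _
      simp [Function.comp]
    rw [ih _ (hkeys ▸ hnod), h1, List.map_map]
    apply List.map_congr_left
    intro p _
    simp only [Function.comp]
    rw [pvDep_cons]
    simp [List.append_assoc]

theorem pvB_items (dB : List (String × List String)) (hpre : (dB.map Prod.fst).Nodup) :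
    countDependeincies_alt dB =
      (dB.map (fun kv => (kv.1, ((pvDep kv.1 dB).length : Int))),
       dB.map (fun kv => (kv.1, pvDep kv.1 dB))) := by
  simp only [countDependeincies_alt]
  have h0 : (dB.foldl (fun d kv => d.insert kv.1 ([] : List String)) PySem.Dict.empty).items
      = dB.map (fun kv => (kv.1, ([] : List String))) := by
    have := PySem.Dict.items_foldl_insert_fresh dB Prod.fst (fun _ => ([] : List String))
      PySem.Dict.empty (by intro a _; exact PySem.Dict.contains_empty _) hpre
    simpa using this
  have hnod0 : (dB.foldl (fun d kv => d.insert kv.1 ([] : List String)) PySem.Dict.empty).keys.Nodup := by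
    simp only [PySem.Dict.keys, h0, List.map_map]
    simpa [Function.comp] using hpre
  rw [pvOuterFoldB dB _ hnod0, h0, List.map_map]
  refine Prod.ext ?_ ?_
  · simp [Function.comp]
  · simp [Function.comp]

-- ===== VERDICT (by name: the statement is the Claim_ definition above) =====
theorem countDependeincies_spec : Claim_equal_countDependeincies := by
  intro dB _ hpre
  unfold Spec_countDependeincies
  rw [pvA_items dB hpre, pvB_items dB hpre]
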